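-- pv_equiv track=rewrite | github.com/open-compass/VLMEvalKit | vlmeval/dataset/utils/mmhelix/evaluators/nonogram_eval.py | _get_clues
-- ===== SOURCE A (Python) =====
-- def _get_clues(line):
--     """Extract clues from a line (row or column)"""
--     clues = []
--     current = 0
--     for cell in line:
--         if cell:
--             current += 1
--         elif current > 0:
--             clues.append(current)
--             current = 0
--     if current > 0:
--         clues.append(current)
--     return clues
-- ===== SOURCE B (Python) =====
-- from itertools import groupby
--
--
-- def _get_clues(line):
--     """Extract clues from a line (row or column)"""
--     return [sum(1 for _ in group)
--             for key, group in groupby(line, key=bool) if key]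
-- ===== Notes on version B (the rewrite author's own statement) =====
-- stated objective: idiomatic
-- what changed: Replaces the manual counter-with-reset loop by itertools.groupby keyed on truthiness: partition the line into maximal runs first, then keep the lengths of the truthy runs.
import Mathlib
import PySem

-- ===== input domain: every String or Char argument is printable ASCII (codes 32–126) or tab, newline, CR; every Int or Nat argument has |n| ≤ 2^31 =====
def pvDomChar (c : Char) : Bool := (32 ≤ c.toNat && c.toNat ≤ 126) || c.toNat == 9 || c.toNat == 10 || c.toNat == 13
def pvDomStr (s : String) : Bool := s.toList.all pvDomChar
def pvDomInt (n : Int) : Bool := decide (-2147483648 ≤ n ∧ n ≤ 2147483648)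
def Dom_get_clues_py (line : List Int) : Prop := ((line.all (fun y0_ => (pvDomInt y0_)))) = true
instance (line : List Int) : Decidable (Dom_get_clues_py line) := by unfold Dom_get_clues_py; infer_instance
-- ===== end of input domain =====

-- B replaces A's counter-with-reset loop by partitioning the line into maximal runs
-- (itertools.groupby keyed on truthiness) and keeping the truthy runs' lengths (idiomatic, same cost).

-- ===== PORT A =====
-- A's loop over `line` with state (clues, current), step for step.
def pvLoopA (clues : List Int) (current : Int) : List Int → List Int × Int
  | [] => (clues, current)
  | cell :: rest =>
    if cell ≠ 0 then pvLoopA clues (current + 1) rest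
    else if current > 0 then pvLoopA (clues ++ [current]) 0 rest
    else pvLoopA clues current rest

def get_clues_py (line : List Int) : List Int :=
  let s := pvLoopA [] 0 line
  if s.2 > 0 then s.1 ++ [s.2] else s.1

-- ===== PORT B =====
-- Source B's groupby(line, key=bool): take the maximal leading run of one truthiness at a time;
-- emit its length if truthy, drop it otherwise.
def get_clues_py_alt : List Int → List Int
  | [] => []
  | x :: xs =>
    if x ≠ 0 then
      (1 + ((xs.takeWhile (fun y => y ≠ 0)).length : Int)) ::
        get_clues_py_alt (xs.dropWhile (fun y => y ≠ 0))
    else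
      get_clues_py_alt xs
termination_by l => l.length
decreasing_by
  · exact Nat.lt_succ_of_le (List.length_dropWhile_le _ _)
  · exact Nat.lt_succ_self _

-- ===== PRECONDITION & SPEC =====
def Spec_get_clues_py (line : List Int) (out : List Int) : Prop := out = get_clues_py_alt line
instance (line : List Int) (out : List Int) : Decidable (Spec_get_clues_py line out) := by unfold Spec_get_clues_py; infer_instance

-- ===== CLAIM (what is proved, stated in full; the proofs are below) =====
def Claim_equal_get_clues_py : Prop := ∀ (line : List Int), Dom_get_clues_py line → Spec_get_clues_py line (get_clues_py line)

-- ===== LEMMAS AND PROOFS =====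

-- What A's loop, finished off by the trailing flush, produces from a pending count c.
def pvCarry (c : Int) : List Int → List Int
  | [] => if c > 0 then [c] else []
  | x :: xs =>
    if x ≠ 0 then pvCarry (c + 1) xs
    else if c > 0 then c :: pvCarry 0 xs
    else pvCarry c xs

theorem pvLoopA_carry (line : List Int) : ∀ (cl : List Int) (c : Int),
    (if (pvLoopA cl c line).2 > 0 then (pvLoopA cl c line).1 ++ [(pvLoopA cl c line).2]
     else (pvLoopA cl c line).1) = cl ++ pvCarry c line := by
  induction line with
  | nil =>
    intro cl c
    simp only [pvLoopA, pvCarry]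
    split_ifs <;> simp
  | cons x xs ih =>
    intro cl c
    by_cases hx : x ≠ 0
    · rw [show pvLoopA cl c (x :: xs) = pvLoopA cl (c + 1) xs from by
            rw [pvLoopA, if_pos hx],
          show pvCarry c (x :: xs) = pvCarry (c + 1) xs from by
            rw [pvCarry, if_pos hx]]
      exact ih cl (c + 1)
    · by_cases hc : c > 0
      · rw [show pvLoopA cl c (x :: xs) = pvLoopA (cl ++ [c]) 0 xs from by
              rw [pvLoopA, if_neg hx, if_pos hc],
            show pvCarry c (x :: xs) = c :: pvCarry 0 xs from by
              rw [pvCarry, if_neg hx, if_pos hc]]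
        rw [ih (cl ++ [c]) 0]
        simp
      · rw [show pvLoopA cl c (x :: xs) = pvLoopA cl c xs from by
              rw [pvLoopA, if_neg hx, if_neg hc],
            show pvCarry c (x :: xs) = pvCarry c xs from by
              rw [pvCarry, if_neg hx, if_neg hc]]
        exact ih cl c

theorem pvCarry_pos (line : List Int) : ∀ (c : Int), 0 < c →
    pvCarry c line =
      (c + ((line.takeWhile (fun y => y ≠ 0)).length : Int)) ::
        pvCarry 0 (line.dropWhile (fun y => y ≠ 0)) := by
  induction line with
  | nil =>
    intro c hc
    simp [pvCarry, hc]
  | cons x xs ih =>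
    intro c hc
    by_cases hx : x ≠ 0
    · rw [pvCarry, if_pos hx, ih (c + 1) (by omega)]
      simp only [List.takeWhile_cons, List.dropWhile_cons, decide_eq_true hx, if_true,
        List.length_cons]
      congr 1
      push_cast
      omega
    · have hx0 : x = 0 := by omega
      subst hx0
      simp [pvCarry, hc]

theorem pvCarry_zero_alt (line : List Int) : pvCarry 0 line = get_clues_py_alt line := by
  induction line using get_clues_py_alt.induct with
  | case1 => simp [pvCarry, get_clues_py_alt]
  | case2 x xs hx ih =>
    rw [pvCarry, if_pos hx, pvCarry_pos xs (0 + 1) (by omega), ih,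
      get_clues_py_alt, if_pos hx]
    norm_num
  | case3 x xs hx ih =>
    rw [pvCarry, if_neg hx, if_neg (by omega : ¬ (0 : Int) > 0),
      get_clues_py_alt, if_neg hx]
    exact ih

-- ===== VERDICT (by name: the statement is the Claim_ definition above) =====
theorem get_clues_py_spec : Claim_equal_get_clues_py := by
  intro line _
  unfold Spec_get_clues_py get_clues_py
  rw [pvLoopA_carry line [] 0, pvCarry_zero_alt]
  simp
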